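-- pv_equiv track=rewrite | github.com/jamesjarlathlong/dag-plan | app/views.py | two_way
-- ===== SOURCE A (Python) =====
-- def not_there(d, nodelist):
--     return [i for i in nodelist if i not in d]
--
-- def get_opp(source, target, graph):
--     return (target,graph[target].get(source))
--
-- def get_opposites(missing, graph):
--     possiblevals = {k:[get_opp(k,v,graph) for v in vs]
--             for k,vs in missing.items()}
--     nonones = {k:dict([i for i in vs if i[1]])
--                for k,vs in possiblevals.items()}
--     return {k:v for k,v in nonones.items() if v}
--
-- def two_way(graph):
--     all_nodes = [k for k in graph]
--     missing_oneway = {k:not_there(v, all_nodes)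
--                      for k,v in graph.items()}
--     opps = get_opposites(missing_oneway,graph)
--     for source,targets in opps.items():
--         for target, value in targets.items():
--             graph[source][target] =value
--     return graph
-- ===== SOURCE B (Python) =====
-- def two_way(graph):
--     # Build a reverse-edge index in one pass over the edges, then append the
--     # missing reverse edges; O(V+E) instead of scanning all node pairs.
--     rev = {}
--     for t, adj in graph.items():
--         for k, v in adj.items():
--             if v:
--                 rev.setdefault(k, []).append((t, v))
--     for k, adj in graph.items():
--         for t, v in rev.get(k, []):
--             if t not in adj:
--                 adj[t] = v
--     return graph
-- ===== Notes on version B (the rewrite author's own statement) =====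
-- stated objective: faster
-- what changed: A scans all node pairs (building missing-edge lists of size V per node and nested dicts) while B builds a reverse-edge index in one pass over the edges and appends the missing reverse edges directly, removing the per-node full-node scan.
import Mathlib
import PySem

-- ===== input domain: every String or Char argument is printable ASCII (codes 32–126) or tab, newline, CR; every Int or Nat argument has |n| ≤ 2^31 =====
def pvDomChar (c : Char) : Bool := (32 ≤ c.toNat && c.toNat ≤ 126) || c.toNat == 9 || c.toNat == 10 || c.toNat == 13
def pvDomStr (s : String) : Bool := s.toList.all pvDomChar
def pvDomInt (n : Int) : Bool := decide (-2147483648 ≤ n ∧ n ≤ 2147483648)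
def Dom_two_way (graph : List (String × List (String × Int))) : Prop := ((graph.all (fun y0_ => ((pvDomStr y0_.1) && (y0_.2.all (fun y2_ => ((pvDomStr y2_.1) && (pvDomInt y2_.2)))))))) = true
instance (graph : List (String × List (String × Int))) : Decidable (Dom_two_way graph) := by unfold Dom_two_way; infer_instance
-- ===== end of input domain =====

-- B symmetrizes the graph via a reverse-edge index built in one pass over the edges instead of
-- scanning every node pair; return-value equivalence (the Python A mutates `graph` in place and
-- returns it; the Python B performs the same in-place mutation).

-- ===== PORT A =====
-- `i[1]` truthiness for i = (target, graph[target].get(source)): None and 0 are both falsy.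
def pvTruthyOptInt (o : Option Int) : Bool :=
  match o with
  | some v => v != 0
  | none => false

def not_there (d : List (String × Int)) (nodelist : List String) : List String :=
  nodelist.filter (fun i => !((d.map Prod.fst).contains i))

-- `graph[target]` is ported with `.getD []`: exact here, because every target handed to get_opp
-- is drawn from the node list, so it is always a key of graph (no KeyError is reachable).
def get_opp (source target : String) (graph : List (String × List (String × Int))) :
    String × Option Int :=
  (target, List.lookup source ((List.lookup target graph).getD []))

-- The dict comprehensions are keyed by graph's keys (unique under Pre_), so each is a List.map;
-- `dict([i for i in vs if i[1]])` keeps pairs with truthy value — its keys are distinct nodes,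
-- so dict() of that list is the list itself, and `.getD 0` unwraps the `some v` the filter kept.
def get_opposites (missing : List (String × List String))
    (graph : List (String × List (String × Int))) : List (String × List (String × Int)) :=
  let possiblevals := missing.map (fun kv => (kv.1, kv.2.map (fun v => get_opp kv.1 v graph)))
  let nonones := possiblevals.map (fun kv =>
    (kv.1, (kv.2.filter (fun i => pvTruthyOptInt i.2)).map (fun i => (i.1, i.2.getD 0))))
  nonones.filter (fun kv => !kv.2.isEmpty)

-- `graph[source][target] = value` on the assoc list: dict assignment on the (unique) entry of key
-- source, ported with PySem.Dict.insert (overwrite in place, new keys append).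
def two_way (graph : List (String × List (String × Int))) : List (String × List (String × Int)) :=
  let all_nodes := graph.map Prod.fst
  let missing_oneway := graph.map (fun kv => (kv.1, not_there kv.2 all_nodes))
  let opps := get_opposites missing_oneway graph
  opps.foldl (fun g st =>
    st.2.foldl (fun g tv =>
      g.map (fun p =>
        if p.1 == st.1 then (p.1, ((PySem.Dict.mk p.2).insert tv.1 tv.2).items) else p)) g)
    graph

-- ===== PORT B =====
-- `rev.setdefault(k, []).append((t, v))` is `modify k [] (· ++ [(t, v)])`; the second loop
-- appends `adj[t] = v` literally (the `t not in adj` guard makes the key fresh, so it appends).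
def two_way_alt (graph : List (String × List (String × Int))) :
    List (String × List (String × Int)) :=
  let rev : PySem.Dict String (List (String × Int)) :=
    graph.foldl (fun r ta =>
      ta.2.foldl (fun r kv =>
        if kv.2 != 0 then r.modify kv.1 [] (fun l => l ++ [(ta.1, kv.2)]) else r) r)
      PySem.Dict.empty
  graph.map (fun ka =>
    (ka.1, (rev.getD ka.1 []).foldl (fun a tv =>
      if (a.map Prod.fst).contains tv.1 then a else a ++ [(tv.1, tv.2)]) ka.2))

-- ===== PRECONDITION & SPEC =====
-- Pre_ excludes association lists with duplicate outer or inner keys: a Python dict cannot hold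
-- duplicate keys, so such lists are ambiguous encodings of A's dict-of-dicts input.
def Pre_two_way (graph : List (String × List (String × Int))) : Prop :=
  (graph.map Prod.fst).Nodup ∧ ∀ p ∈ graph, (p.2.map Prod.fst).Nodup

instance (graph : List (String × List (String × Int))) : Decidable (Pre_two_way graph) := by
  unfold Pre_two_way; infer_instance

def pvWitness_two_way : (List (String × List (String × Int))) :=
  [("a", [("b", 1)]), ("b", [])]

def Spec_two_way (graph : List (String × List (String × Int)))
    (out : List (String × List (String × Int))) : Prop := out = two_way_alt graph

instance (graph : List (String × List (String × Int)))
    (out : List (String × List (String × Int))) : Decidable (Spec_two_way graph out) := by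
  unfold Spec_two_way; infer_instance

-- ===== CLAIM (what is proved, stated in full; the proofs are below) =====
def Claim_equal_two_way : Prop := ∀ (graph : List (String × List (String × Int))),
  Dom_two_way graph → Pre_two_way graph → Spec_two_way graph (two_way graph)

-- ===== LEMMAS AND PROOFS =====

-- The list of reverse edges both programs add to node k's adjacency list adj: for each node t of
-- the graph (in node order) not already a neighbour of k, the value of the edge t→k if nonzero.
def pvAdds (graph : List (String × List (String × Int))) (k : String)
    (adj : List (String × Int)) : List (String × Int) :=
  graph.filterMap (fun p =>
    if (adj.map Prod.fst).contains p.1 then none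
    else match List.lookup k p.2 with
      | some v => if v != 0 then some (p.1, v) else none
      | none => none)

-- inserting the pairs of ts into the dict a in order
def pvIns (ts : List (String × Int)) (a : List (String × Int)) : List (String × Int) :=
  (ts.foldl (fun d tv => d.insert tv.1 tv.2) (PySem.Dict.mk a)).items

theorem pv_lookup_of_mem_nodup {ν : Type} (g : List (String × ν)) (p : String × ν)
    (hn : (g.map Prod.fst).Nodup) (hm : p ∈ g) : List.lookup p.1 g = some p.2 := by
  induction g with
  | nil => simp at hm
  | cons q rest ih =>
    simp only [List.map_cons, List.nodup_cons] at hn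
    rcases List.mem_cons.mp hm with h | h
    · subst h; simp [List.lookup]
    · have hne : p.1 ≠ q.1 := by
        intro he; exact hn.1 (he ▸ List.mem_map_of_mem h)
      simp [List.lookup, beq_eq_false_iff_ne.mpr hne, ih hn.2 h]

theorem pv_lookup_eq_none {ν : Type} (g : List (String × ν)) (x : String)
    (hx : x ∉ g.map Prod.fst) : List.lookup x g = none := by
  induction g with
  | nil => rfl
  | cons q rest ih =>
    simp only [List.map_cons, List.mem_cons, not_or] at hx
    simp [List.lookup, beq_eq_false_iff_ne.mpr hx.1, ih hx.2]

theorem pv_chain {α β γ : Type} (l : List α) (c : α → Bool) (f : α → β) (d : β → Bool)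
    (g : β → γ) :
    (((l.filter c).map f).filter d).map g
      = l.filterMap (fun t => if c t then (if d (f t) then some (g (f t)) else none) else none) := by
  induction l with
  | nil => rfl
  | cons a l ih =>
    simp only [List.filter_cons, List.filterMap_cons]
    by_cases h1 : c a
    · by_cases h2 : d (f a) <;> simp [h1, h2, ih]
    · simp [h1, ih]

theorem pv_Aentry (graph : List (String × List (String × Int))) (k : String)
    (adj : List (String × Int)) (hn : (graph.map Prod.fst).Nodup) :
    (((not_there adj (graph.map Prod.fst)).map (fun v => get_opp k v graph)).filter
        (fun i => pvTruthyOptInt i.2)).map (fun i => (i.1, i.2.getD 0))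
      = pvAdds graph k adj := by
  simp only [not_there]
  rw [pv_chain, List.filterMap_map]
  apply List.filterMap_congr
  intro p hp
  simp only [Function.comp_apply, get_opp, pv_lookup_of_mem_nodup graph p hn hp]
  cases hc : (adj.map Prod.fst).contains p.1 with
  | true => simp
  | false =>
    cases hl : List.lookup k p.2 with
    | none => simp [hl, pvTruthyOptInt]
    | some v =>
      by_cases hv : v = 0 <;> simp [hl, pvTruthyOptInt, hv]

theorem pv_inner_fold (ts : List (String × Int)) (g : List (String × List (String × Int)))
    (s : String) :
    ts.foldl (fun g tv =>
        g.map (fun p =>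
          if p.1 == s then (p.1, ((PySem.Dict.mk p.2).insert tv.1 tv.2).items) else p)) g
      = g.map (fun p => if p.1 == s then (p.1, pvIns ts p.2) else p) := by
  induction ts generalizing g with
  | nil =>
    simp only [List.foldl_nil]
    have h : ∀ p : String × List (String × Int),
        (if p.1 == s then (p.1, pvIns [] p.2) else p) = p := by
      intro p; cases p; split <;> simp [pvIns]
    rw [List.map_congr_left (fun a _ => h a)]; simp
  | cons tv ts ih =>
    rw [List.foldl_cons, ih, List.map_map]
    apply List.map_congr_left
    intro p _
    by_cases hp : p.1 = s <;> simp [hp, pvIns]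

theorem pv_ins_fresh (ts adj : List (String × Int)) (hnd : (ts.map Prod.fst).Nodup)
    (hf : ∀ tv ∈ ts, (adj.map Prod.fst).contains tv.1 = false) :
    pvIns ts adj = adj ++ ts := by
  unfold pvIns
  rw [PySem.Dict.items_foldl_insert_fresh ts Prod.fst Prod.snd (PySem.Dict.mk adj)
    (by intro a ha
        rw [PySem.Dict.contains_mk]
        have h2 : a.1 ∉ adj.map Prod.fst := by simpa using hf a ha
        refine List.any_eq_false.mpr ?_
        intro p hp he
        have he' : p.1 = a.1 := by simpa using he
        exact h2 (he' ▸ List.mem_map_of_mem hp))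
    hnd]
  simp [PySem.Dict.items]

theorem pv_outer_fold (L : List (String × List (String × Int)))
    (hn : (L.map Prod.fst).Nodup) (g : List (String × List (String × Int))) :
    L.foldl (fun g st => g.map (fun p => if p.1 == st.1 then (p.1, pvIns st.2 p.2) else p)) g
      = g.map (fun p => match List.lookup p.1 L with
          | some ts => (p.1, pvIns ts p.2)
          | none => p) := by
  induction L generalizing g with
  | nil =>
    simp only [List.foldl_nil, List.lookup]
    have h : ∀ p : String × List (String × Int),
        (match (none : Option (List (String × Int))) with
          | some ts => (p.1, pvIns ts p.2)
          | none => p) = p := fun p => rfl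
    rw [List.map_congr_left (fun a _ => h a)]; simp
  | cons st L ih =>
    simp only [List.map_cons, List.nodup_cons] at hn
    rw [List.foldl_cons, ih hn.2, List.map_map]
    apply List.map_congr_left
    intro p _
    by_cases hp : p.1 = st.1
    · simp [hp, List.lookup, pv_lookup_eq_none L st.1 hn.1]
    · simp [List.lookup, hp, beq_eq_false_iff_ne.mpr hp]

theorem pv_lookup_map_filter {β : Type} (g : List (String × List (String × Int)))
    (e : String × List (String × Int) → String × β) (c : String × β → Bool)
    (he : ∀ q, (e q).1 = q.1) (hn : (g.map Prod.fst).Nodup)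
    (p : String × List (String × Int)) (hm : p ∈ g) :
    List.lookup p.1 ((g.map e).filter c) = if c (e p) then some (e p).2 else none := by
  induction g with
  | nil => simp at hm
  | cons q rest ih =>
    simp only [List.map_cons, List.nodup_cons] at hn
    have hnone : q.1 ∉ ((rest.map e).filter c).map Prod.fst := by
      intro hmem
      rcases List.mem_map.mp hmem with ⟨r, hr, hr1⟩
      rcases List.mem_map.mp (List.mem_of_mem_filter hr) with ⟨q', hq', hq'e⟩
      exact hn.1 (by
        have : q'.1 = q.1 := by rw [← hq'e] at hr1; rw [← hr1, he q']
        exact this ▸ List.mem_map_of_mem hq')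
    rcases List.mem_cons.mp hm with h | h
    · subst h
      simp only [List.map_cons, List.filter_cons]
      by_cases hc : c (e p)
      · simp [hc, List.lookup, he p]
      · simp [hc, pv_lookup_eq_none _ _ hnone]
    · have hne : p.1 ≠ q.1 := by
        intro hee; exact hn.1 (hee ▸ List.mem_map_of_mem h)
      simp only [List.map_cons, List.filter_cons]
      by_cases hc : c (e q)
      · simp only [hc, if_pos]
        have : (p.1 == (e q).1) = false := by
          rw [he q]; exact beq_eq_false_iff_ne.mpr hne
        simp [List.lookup, this, ih hn.2 h]
      · simp [hc, ih hn.2 h]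

theorem pv_filterMap_fst_sublist {α β : Type} (g : List (String × α))
    (f : String × α → Option (String × β)) (hf : ∀ q r, f q = some r → r.1 = q.1) :
    ((g.filterMap f).map Prod.fst).Sublist (g.map Prod.fst) := by
  induction g with
  | nil => simp
  | cons q rest ih =>
    simp only [List.filterMap_cons, List.map_cons]
    cases hq : f q with
    | none => exact ih.cons q.1
    | some r =>
      simp only [List.map_cons]
      rw [hf q r hq]
      exact ih.cons₂ q.1

theorem pv_adds_fresh (graph : List (String × List (String × Int))) (k : String)
    (adj : List (String × Int)) :
    ∀ tv ∈ pvAdds graph k adj, (adj.map Prod.fst).contains tv.1 = false := by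
  intro tv htv
  rcases List.mem_filterMap.mp htv with ⟨q, _, hq⟩
  by_cases hc : (adj.map Prod.fst).contains q.1
  · rw [if_pos hc] at hq; cases hq
  · rw [if_neg hc] at hq
    cases hl : List.lookup k q.2 with
    | none => simp [hl] at hq
    | some v =>
      simp only [hl] at hq
      by_cases hv : v != 0
      · rw [if_pos hv] at hq
        have htq : tv = (q.1, v) := (Option.some.inj hq).symm
        rw [htq]
        simpa using hc
      · rw [if_neg hv] at hq; cases hq

theorem pv_adds_key (graph : List (String × List (String × Int))) (k : String)
    (adj : List (String × Int)) :
    ∀ (q : String × List (String × Int)) (r : String × Int),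
      (fun p : String × List (String × Int) =>
        if (adj.map Prod.fst).contains p.1 then none
        else match List.lookup k p.2 with
          | some v => if v != 0 then some (p.1, v) else none
          | none => none) q = some r → r.1 = q.1 := by
  intro q r hq
  simp only at hq
  by_cases hc : (adj.map Prod.fst).contains q.1
  · rw [if_pos hc] at hq; cases hq
  · rw [if_neg hc] at hq
    cases hl : List.lookup k q.2 with
    | none => simp [hl] at hq
    | some v =>
      simp only [hl] at hq
      by_cases hv : v != 0
      · rw [if_pos hv] at hq
        rw [← Option.some.inj hq]
      · rw [if_neg hv] at hq; cases hq

theorem pv_A_canon (graph : List (String × List (String × Int))) (h : Pre_two_way graph) :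
    two_way graph = graph.map (fun p => (p.1, p.2 ++ pvAdds graph p.1 p.2)) := by
  obtain ⟨hn, -⟩ := h
  simp only [two_way, get_opposites, List.map_map]
  simp only [pv_inner_fold]
  rw [pv_outer_fold]
  · apply List.map_congr_left
    intro p hp
    rw [pv_lookup_map_filter graph
        (((fun kv => (kv.1, List.map (fun i => (i.1, i.2.getD 0))
              (List.filter (fun i => pvTruthyOptInt i.2) kv.2))) ∘
          (fun kv => (kv.1, List.map (fun v => get_opp kv.1 v graph) kv.2)) ∘ (fun kv =>
            (kv.1, not_there kv.2 (List.map Prod.fst graph)))))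
        (fun kv => !kv.2.isEmpty) (fun q => rfl) hn p hp]
    simp only [Function.comp_apply]
    have hA : (((not_there p.2 (graph.map Prod.fst)).map (fun v => get_opp p.1 v graph)).filter
        (fun i => pvTruthyOptInt i.2)).map (fun i => (i.1, i.2.getD 0))
        = pvAdds graph p.1 p.2 := pv_Aentry graph p.1 p.2 hn
    rw [hA]
    by_cases he : (pvAdds graph p.1 p.2).isEmpty
    · have he' : pvAdds graph p.1 p.2 = [] := List.isEmpty_iff.mp he
      simp [he, he']
    · simp only [he, Bool.not_false, if_pos]
      have hnd : ((pvAdds graph p.1 p.2).map Prod.fst).Nodup :=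
        (pv_filterMap_fst_sublist graph _ (pv_adds_key graph p.1 p.2)).nodup hn
      rw [pv_ins_fresh _ _ hnd (pv_adds_fresh graph p.1 p.2)]
  · have h2 := List.Sublist.map Prod.fst
      (List.filter_sublist (p := fun kv : String × List (String × Int) => !kv.2.isEmpty)
        (l := graph.map (((fun kv => (kv.1, List.map (fun i => (i.1, i.2.getD 0))
              (List.filter (fun i => pvTruthyOptInt i.2) kv.2))) ∘
          (fun kv => (kv.1, List.map (fun v => get_opp kv.1 v graph) kv.2)) ∘ (fun kv =>
            (kv.1, not_there kv.2 (List.map Prod.fst graph)))))))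
    rw [List.map_map] at h2
    have h3 : graph.map (Prod.fst ∘ (((fun kv => (kv.1, List.map (fun i => (i.1, i.2.getD 0))
              (List.filter (fun i => pvTruthyOptInt i.2) kv.2))) ∘
          (fun kv => (kv.1, List.map (fun v => get_opp kv.1 v graph) kv.2)) ∘ (fun kv =>
            (kv.1, not_there kv.2 (List.map Prod.fst graph))))))
        = graph.map Prod.fst := List.map_congr_left (fun q _ => rfl)
    rw [h3] at h2
    exact h2.nodup hn

theorem pv_nested_fold (graph : List (String × List (String × Int)))
    (d : PySem.Dict String (List (String × Int))) :
    graph.foldl (fun r ta =>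
        ta.2.foldl (fun r kv =>
          if kv.2 != 0 then r.modify kv.1 [] (fun l => l ++ [(ta.1, kv.2)]) else r) r) d
      = (graph.flatMap (fun ta =>
          (ta.2.filter (fun kv => kv.2 != 0)).map (fun kv => (kv.1, (ta.1, kv.2))))).foldl
            (fun d p => d.modify p.1 [] (fun l => l ++ [p.2])) d := by
  induction graph generalizing d with
  | nil => rfl
  | cons ta rest ih =>
    rw [List.foldl_cons, List.flatMap_cons, List.foldl_append, ih]
    congr 1
    rw [List.foldl_map, List.foldl_filter]

theorem pv_entry_none (rest : List (String × Int)) (t k : String)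
    (hk : k ∉ rest.map Prod.fst) :
    (((rest.filter (fun kv => kv.2 != 0)).map (fun kv => (kv.1, (t, kv.2)))).filter
        (fun p => p.1 == k)).map (fun x => x.2) = [] := by
  rw [List.filter_eq_nil_iff.mpr]
  · rfl
  · intro a ha
    rcases List.mem_map.mp ha with ⟨kv, hkv, hkva⟩
    have hmem : kv.1 ∈ rest.map Prod.fst :=
      List.mem_map_of_mem (List.mem_of_mem_filter hkv)
    have : a.1 = kv.1 := by rw [← hkva]
    have hne : kv.1 ≠ k := fun he => hk (by rw [← he]; exact hmem)
    simp only [this]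
    simp [hne]

theorem pv_rev_entry (adj : List (String × Int)) (t k : String)
    (hn : (adj.map Prod.fst).Nodup) :
    (((adj.filter (fun kv => kv.2 != 0)).map (fun kv => (kv.1, (t, kv.2)))).filter
        (fun p => p.1 == k)).map (fun x => x.2)
      = (match List.lookup k adj with
          | some v => if v != 0 then some (t, v) else none
          | none => (none : Option (String × Int))).toList := by
  induction adj with
  | nil => rfl
  | cons q rest ih =>
    simp only [List.map_cons, List.nodup_cons] at hn
    by_cases hk : k = q.1
    · have hrest : k ∉ rest.map Prod.fst := hk ▸ hn.1
      simp only [List.filter_cons]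
      by_cases hv : q.2 != 0
      · simp only [hv, if_pos, List.map_cons, List.filter_cons,
          show (q.1 == k) = true from beq_iff_eq.mpr hk.symm, List.map_cons,
          List.lookup, show (k == q.1) = true from beq_iff_eq.mpr hk]
        simp [pv_entry_none rest t k hrest, hv]
      · simp only [hv, Bool.false_eq_true, if_neg, Bool.not_eq_true,
          List.lookup, show (k == q.1) = true from beq_iff_eq.mpr hk]
        simp only [hv, Bool.false_eq_true, if_false]
        rw [pv_entry_none rest t k hrest]
        rfl
    · have hne : (k == q.1) = false := beq_eq_false_iff_ne.mpr hk
      have hne' : (q.1 == k) = false := beq_eq_false_iff_ne.mpr (fun h => hk h.symm)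
      simp only [List.filter_cons, List.lookup, hne]
      by_cases hv : q.2 != 0
      · simp only [hv, if_pos, List.map_cons, List.filter_cons, hne',
          Bool.false_eq_true, if_false]
        exact ih hn.2
      · simp only [hv, Bool.false_eq_true, if_false]
        exact ih hn.2

theorem pv_rev_getD (graph : List (String × List (String × Int)))
    (h2 : ∀ p ∈ graph, (p.2.map Prod.fst).Nodup) (k : String) :
    (graph.foldl (fun r ta =>
        ta.2.foldl (fun r kv =>
          if kv.2 != 0 then r.modify kv.1 [] (fun l => l ++ [(ta.1, kv.2)]) else r) r)
      (PySem.Dict.empty : PySem.Dict String (List (String × Int)))).getD k []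
      = graph.filterMap (fun ta : String × List (String × Int) =>
          match List.lookup k ta.2 with
          | some v => if v != 0 then some (ta.1, v) else none
          | none => none) := by
  rw [pv_nested_fold, PySem.Dict.getD_foldl_modify_append]
  rw [PySem.Dict.getD_empty]
  rw [List.nil_append]
  induction graph with
  | nil => rfl
  | cons ta rest ih =>
    have hta := h2 ta (List.mem_cons_self)
    rw [List.flatMap_cons, List.filter_append, List.map_append, List.filterMap_cons,
      ih (fun p hp => h2 p (List.mem_cons_of_mem ta hp))]
    rw [pv_rev_entry ta.2 ta.1 k hta]
    cases hm : (match List.lookup k ta.2 with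
        | some v => if v != 0 then some (ta.1, v) else none
        | none => (none : Option (String × Int))) with
    | none => simp
    | some x => simp

theorem pv_guard_fold (rs : List (String × Int)) (adj : List (String × Int))
    (hnd : (rs.map Prod.fst).Nodup) :
    rs.foldl (fun a tv =>
        if (a.map Prod.fst).contains tv.1 then a else a ++ [(tv.1, tv.2)]) adj
      = adj ++ rs.filter (fun q => !((adj.map Prod.fst).contains q.1)) := by
  induction rs generalizing adj with
  | nil => simp
  | cons q rs ih =>
    simp only [List.map_cons, List.nodup_cons] at hnd
    rw [List.foldl_cons, List.filter_cons]
    by_cases hq : (adj.map Prod.fst).contains q.1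
    · simp only [hq, if_pos, Bool.not_true, Bool.false_eq_true, if_false]
      exact ih adj hnd.2
    · have hqf : (adj.map Prod.fst).contains q.1 = false := by simpa using hq
      simp only [hqf, Bool.false_eq_true, if_false, Bool.not_false, if_pos]
      rw [ih (adj ++ [(q.1, q.2)]) hnd.2]
      have hfc : ∀ x ∈ rs,
          (!(((adj ++ [(q.1, q.2)]).map Prod.fst).contains x.1))
            = (!((adj.map Prod.fst).contains x.1)) := by
        intro x hx
        have hxq : x.1 ≠ q.1 := fun he => hnd.1 (he ▸ List.mem_map_of_mem hx)
        simp [List.contains_eq_mem, hxq]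
      rw [List.filter_congr hfc]
      simp

theorem pv_fB_key (graph : List (String × List (String × Int))) (k : String) :
    ∀ (q : String × List (String × Int)) (r : String × Int),
      (fun ta : String × List (String × Int) =>
        match List.lookup k ta.2 with
        | some v => if v != 0 then some (ta.1, v) else none
        | none => none) q = some r → r.1 = q.1 := by
  intro q r hq
  simp only at hq
  cases hl : List.lookup k q.2 with
  | none => simp only [hl] at hq; cases hq
  | some v =>
    simp only [hl] at hq
    by_cases hv : v != 0
    · rw [if_pos hv] at hq
      rw [← Option.some.inj hq]
    · rw [if_neg hv] at hq; cases hq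

theorem pv_filter_filterMap {α β : Type} (l : List α) (f : α → Option β) (c : β → Bool) :
    (l.filterMap f).filter c
      = l.filterMap (fun a => match f a with
          | some b => if c b then some b else none
          | none => none) := by
  induction l with
  | nil => rfl
  | cons a l ih =>
    simp only [List.filterMap_cons]
    cases hf : f a with
    | none => simpa using ih
    | some b =>
      by_cases hc : c b <;> simp [List.filter_cons, hc, ih]

theorem pv_rev_filter (graph : List (String × List (String × Int))) (k : String)
    (adj : List (String × Int)) :
    (graph.filterMap (fun ta : String × List (String × Int) =>
        match List.lookup k ta.2 with
        | some v => if v != 0 then some (ta.1, v) else none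
        | none => none)).filter (fun q => !((adj.map Prod.fst).contains q.1))
      = pvAdds graph k adj := by
  rw [pv_filter_filterMap]
  apply List.filterMap_congr
  intro ta _
  cases hl : List.lookup k ta.2 with
  | none =>
    cases hc : (adj.map Prod.fst).contains ta.1 <;> simp
  | some v =>
    by_cases hv : v = 0
    · cases hc : (adj.map Prod.fst).contains ta.1 <;> simp [hv]
    · have hv' : (v != 0) = true := by simpa using hv
      simp only [hv', if_pos]
      cases hc : (adj.map Prod.fst).contains ta.1 <;> simp

theorem pv_B_canon (graph : List (String × List (String × Int))) (h : Pre_two_way graph) :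
    two_way_alt graph = graph.map (fun p => (p.1, p.2 ++ pvAdds graph p.1 p.2)) := by
  obtain ⟨hn, h2⟩ := h
  simp only [two_way_alt]
  apply List.map_congr_left
  intro p _
  rw [pv_rev_getD graph h2 p.1]
  have hnd : ((graph.filterMap (fun ta : String × List (String × Int) =>
      match List.lookup p.1 ta.2 with
      | some v => if v != 0 then some (ta.1, v) else none
      | none => none)).map Prod.fst).Nodup :=
    (pv_filterMap_fst_sublist graph _ (pv_fB_key graph p.1)).nodup hn
  rw [pv_guard_fold _ p.2 hnd, pv_rev_filter graph p.1 p.2]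

-- ===== VERDICT (by name: the statement is the Claim_ definition above) =====
theorem two_way_spec : Claim_equal_two_way := by
  intro graph _ hpre
  unfold Spec_two_way
  rw [pv_A_canon graph hpre, pv_B_canon graph hpre]
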